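-- pv_equiv track=rewrite | github.com/exueyuanAlgorithm/AlgorithmDemo | 变换S到T.py | convert_s_to_t
-- ===== SOURCE A (Python) =====
-- import collections
--
-- def convert_s_to_t(S, T):
--     if S == T:
--         return 0
--     s_dict = collections.defaultdict(int)
--     t_dict = collections.defaultdict(int)
--     for item in S:
--         s_dict[item] += 1
--     for item in T:
--         t_dict[item] += 1
--     if s_dict != t_dict:
--         return -1
--     length = len(S)
--     i = 0
--     j = 0
--     count = 0
--     while i < length and j < length:
--         if S[i] == T[j]:
--             i += 1
--             j += 1
--             count += 1
--         else:
--             i += 1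
--     return length - count
-- ===== SOURCE B (Python) =====
-- def convert_s_to_t(S, T):
--     if S == T:
--         return 0
--     if sorted(S) != sorted(T):
--         return -1
--     # inverted index: for each character, its positions in S (increasing)
--     pos = {}
--     for i, ch in enumerate(S):
--         pos.setdefault(ch, []).append(i)
--     # greedy-match T against S by jumping directly to the next stored
--     # occurrence of each character instead of scanning S
--     p = -1
--     j = 0
--     for ch in T:
--         lst = pos[ch]
--         while lst and lst[0] <= p:
--             lst = lst[1:]
--         if not lst:
--             break
--         p = lst[0]
--         pos[ch] = lst[1:]
--         j += 1
--     return len(S) - j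
-- ===== Notes on version B (the rewrite author's own statement) =====
-- stated objective: alternative
-- what changed: The anagram test becomes a sorted-list comparison instead of two frequency dicts, and the matching phase is replaced by an inverted index: B builds a dict from each character to its list of positions in S once, then walks T jumping directly to the next stored occurrence after the last matched position, so the two-pointer scan of S disappears.
import Mathlib
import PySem

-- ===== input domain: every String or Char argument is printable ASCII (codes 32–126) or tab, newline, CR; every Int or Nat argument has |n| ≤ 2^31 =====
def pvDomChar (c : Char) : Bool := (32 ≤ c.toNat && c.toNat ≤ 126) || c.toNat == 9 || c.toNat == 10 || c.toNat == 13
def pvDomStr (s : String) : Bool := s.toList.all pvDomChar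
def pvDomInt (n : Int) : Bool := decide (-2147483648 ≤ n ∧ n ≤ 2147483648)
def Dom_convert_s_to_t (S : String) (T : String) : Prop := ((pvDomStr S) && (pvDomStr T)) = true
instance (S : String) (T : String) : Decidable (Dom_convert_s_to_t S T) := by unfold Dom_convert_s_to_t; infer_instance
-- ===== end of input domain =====

-- B: anagram check via sorted-list comparison, and the matching phase replaced by an
-- inverted index (char -> positions in S) walked along T, instead of A's frequency
-- dicts plus two-pointer scan of S (alternative algorithm, same outputs).


-- ===== PORT A =====
-- the while loop of A: i scans S, j scans T, count counts matches
def pvLoopA (S T : List Char) (i j count : Nat) : Int :=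
  if h : i < S.length ∧ j < S.length then
    if PySem.List.pyGet? S (i : Int) = PySem.List.pyGet? T (j : Int) then
      pvLoopA S T (i+1) (j+1) (count+1)
    else
      pvLoopA S T (i+1) j count
  else
    (S.length : Int) - count
termination_by S.length - i
decreasing_by all_goals omega

def convert_s_to_t (S : String) (T : String) : Int :=
  if S == T then 0
  else
    -- the two defaultdict-counting loops (d[item] += 1 reads with default 0)
    let s_dict : PySem.Dict Char Int :=
      S.toList.foldl (fun d c => d.modify c 0 (· + 1)) PySem.Dict.empty
    let t_dict : PySem.Dict Char Int :=
      T.toList.foldl (fun d c => d.modify c 0 (· + 1)) PySem.Dict.empty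
    -- Python dict == ignores insertion order: same keys, same values
    if !(s_dict.keys.all (fun k => s_dict.get? k == t_dict.get? k) &&
         t_dict.keys.all (fun k => s_dict.get? k == t_dict.get? k)) then -1
    else
      pvLoopA S.toList T.toList 0 0 0

-- ===== PORT B =====
-- the inverted-index build: for i, ch in enumerate(S): pos.setdefault(ch, []).append(i)
def pvBuildPos (S : List Char) : PySem.Dict Char (List Int) :=
  (PySem.List.enumerate S 0).foldl
    (fun d ic => d.modify ic.2 [] (fun l => l ++ [ic.1])) PySem.Dict.empty

-- the for-ch-in-T loop; the inner `while lst and lst[0] <= p: lst = lst[1:]` is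
-- List.dropWhile, `break` ends the recursion.  `pos[ch]` is read as getD ch []:
-- after the anagram guard every ch of T is a key of pos, so no KeyError is reachable
-- (and an absent key would hit the `if not lst: break` branch anyway).
def pvLoopB (pos : PySem.Dict Char (List Int)) (p : Int) (j : Nat) : List Char → Nat
  | [] => j
  | ch :: rest =>
    match (pos.getD ch []).dropWhile (fun x => decide (x ≤ p)) with
    | [] => j
    | q :: lrest => pvLoopB (pos.insert ch lrest) q (j + 1) rest

def convert_s_to_t_alt (S : String) (T : String) : Int :=
  if S == T then 0
  else if PySem.List.sorted S.toList (fun x => x) false ≠ PySem.List.sorted T.toList (fun x => x) false then -1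
  else
    let pos := pvBuildPos S.toList
    let j := pvLoopB pos (-1) 0 T.toList
    (S.toList.length : Int) - (j : Int)

-- ===== PRECONDITION & SPEC =====
def Spec_convert_s_to_t (S : String) (T : String) (out : Int) : Prop := out = convert_s_to_t_alt S T
instance (S : String) (T : String) (out : Int) : Decidable (Spec_convert_s_to_t S T out) := by unfold Spec_convert_s_to_t; infer_instance

-- ===== CLAIM (what is proved, stated in full; the proofs are below) =====
def Claim_equal_convert_s_to_t : Prop := ∀ (S : String) (T : String), Dom_convert_s_to_t S T → Spec_convert_s_to_t S T (convert_s_to_t S T)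

-- ===== LEMMAS AND PROOFS =====

-- ---- A's dict-equality anagram test is multiset equality ----
lemma get?_counter (xs : List Char) (v : Char) :
    (PySem.Dict.counter xs).get? v = if v ∈ xs then some ((xs.count v : Int)) else none := by
  by_cases h : v ∈ xs
  · rw [if_pos h]
    have hc : (PySem.Dict.counter xs).contains v = true := by
      rw [PySem.Dict.contains_counter]; simpa using h
    have hsome : (PySem.Dict.counter xs).get? v ≠ none := by
      intro hnone
      rw [PySem.Dict.get?_eq_none_iff_contains] at hnone
      rw [hc] at hnone
      simp at hnone
    obtain ⟨w, hw⟩ := Option.ne_none_iff_exists'.mp hsome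
    have hd := PySem.Dict.getD_counter xs v
    rw [PySem.Dict.getD_eq_get?_getD, hw] at hd
    simp only [Option.getD_some] at hd
    rw [hw, hd]
  · rw [if_neg h, PySem.Dict.get?_eq_none_iff_contains, PySem.Dict.contains_counter]
    simpa using h

lemma dict_test_iff_perm (S T : List Char) :
    ((PySem.Dict.counter S).keys.all
        (fun k => (PySem.Dict.counter S).get? k == (PySem.Dict.counter T).get? k) &&
     (PySem.Dict.counter T).keys.all
        (fun k => (PySem.Dict.counter S).get? k == (PySem.Dict.counter T).get? k)) = true
    ↔ S.Perm T := by
  simp only [Bool.and_eq_true, List.all_eq_true, beq_iff_eq, PySem.Dict.keys_counter,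
    PySem.Set.mem_ofList, get?_counter]
  constructor
  · rintro ⟨hS, hT⟩
    rw [List.perm_iff_count]
    intro c
    by_cases hcS : c ∈ S
    · have h := hS c hcS
      rw [if_pos hcS] at h
      by_cases hcT : c ∈ T
      · rw [if_pos hcT] at h
        exact_mod_cast Option.some.inj h
      · rw [if_neg hcT] at h; exact absurd h (by simp)
    · by_cases hcT : c ∈ T
      · have h := hT c hcT
        rw [if_neg hcS, if_pos hcT] at h
        exact absurd h (by simp)
      · rw [List.count_eq_zero_of_not_mem hcS, List.count_eq_zero_of_not_mem hcT]
  · intro hperm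
    have hcount := List.perm_iff_count.mp hperm
    have hmem : ∀ k : Char, k ∈ S ↔ k ∈ T := fun k => hperm.mem_iff
    have key : ∀ k : Char,
        (if k ∈ S then some ((S.count k : Int)) else none) =
        (if k ∈ T then some ((T.count k : Int)) else none) := by
      intro k
      by_cases h : k ∈ S
      · rw [if_pos h, if_pos ((hmem k).mp h), hcount]
      · rw [if_neg h, if_neg (fun ht => h ((hmem k).mpr ht))]
    exact ⟨fun k _ => key k, fun k _ => key k⟩

-- ---- the common reference: greedy prefix match count ----
def pvGreedy : List Char → List Char → Nat
  | [], _ => 0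
  | _ :: _, [] => 0
  | a :: L, c :: T => if a = c then pvGreedy L T + 1 else pvGreedy L (c :: T)

-- positions of c in L, counted from n (the mathematical content of the inverted index)
def pvAllPos (L : List Char) (c : Char) (n : Int) : List Int :=
  match L with
  | [] => []
  | a :: L' => if a = c then n :: pvAllPos L' c (n+1) else pvAllPos L' c (n+1)

-- reference machine for B's loop, reading the full index
def pvRm (S : List Char) : Int → Nat → List Char → Nat
  | _, j, [] => j
  | p, j, c :: rest =>
    match (pvAllPos S c 0).dropWhile (fun x => decide (x ≤ p)) with
    | [] => j
    | q :: _ => pvRm S q (j + 1) rest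

lemma pvGreedy_nil (L : List Char) : pvGreedy L [] = 0 := by
  cases L <;> rfl

lemma mem_allPos_ge (c : Char) :
    ∀ (L : List Char) (n x : Int), x ∈ pvAllPos L c n → n ≤ x := by
  intro L
  induction L with
  | nil => intro n x h; simp [pvAllPos] at h
  | cons a L' ih =>
    intro n x h
    simp only [pvAllPos] at h
    by_cases hac : a = c
    · rw [if_pos hac] at h
      rcases List.mem_cons.mp h with h | h
      · omega
      · have := ih (n+1) x h; omega
    · rw [if_neg hac] at h
      have := ih (n+1) x h; omega

lemma dropWhile_le_of_lt (l : List Int) (n p : Int) (hall : ∀ x ∈ l, n ≤ x) (h : p < n) :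
    l.dropWhile (fun x => decide (x ≤ p)) = l := by
  cases l with
  | nil => simp
  | cons a t =>
    have hna : ¬ (a ≤ p) := by have := hall a (by simp); omega
    simp [hna]

lemma dropWhile_le_trans (l : List Int) (p q : Int) (h : p ≤ q) :
    (l.dropWhile (fun x => decide (x ≤ p))).dropWhile (fun x => decide (x ≤ q)) =
      l.dropWhile (fun x => decide (x ≤ q)) := by
  induction l with
  | nil => simp
  | cons a t ih =>
    by_cases ha : a ≤ p
    · simp only [List.dropWhile_cons, decide_eq_true_eq]
      rw [if_pos ha, if_pos (by omega : a ≤ q), ih]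
    · have h1 : (a :: t).dropWhile (fun x => decide (x ≤ p)) = a :: t := by
        rw [List.dropWhile_cons, if_neg (by simpa using ha)]
      rw [h1]

lemma dropWhile_head_false {α : Type} (f : α → Bool) :
    ∀ (l : List α) (a : α) (t : List α), l.dropWhile f = a :: t → f a = false := by
  intro l
  induction l with
  | nil => intro a t h; simp [List.dropWhile] at h
  | cons b l ih =>
    intro a t h
    by_cases hb : f b = true
    · rw [List.dropWhile_cons, if_pos hb] at h
      exact ih a t h
    · rw [List.dropWhile_cons, if_neg hb] at h
      cases h
      simpa using hb

lemma allPos_drop (c : Char) :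
    ∀ (q : Nat) (L : List Char) (n : Int),
      pvAllPos (L.drop q) c (n + q) =
        (pvAllPos L c n).dropWhile (fun x => decide (x ≤ n + q - 1)) := by
  intro q
  induction q with
  | zero =>
    intro L n
    simp only [List.drop_zero, Nat.cast_zero, add_zero]
    exact (dropWhile_le_of_lt _ n _ (fun x hx => mem_allPos_ge c L n x hx) (by omega)).symm
  | succ q ih =>
    intro L n
    cases L with
    | nil => simp [pvAllPos]
    | cons a L' =>
      have h1 : n + ((q+1 : Nat) : Int) = (n+1) + ((q : Nat) : Int) := by push_cast; ring
      rw [List.drop_succ_cons, h1, ih L' (n+1)]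
      by_cases hac : a = c
      · rw [show pvAllPos (a::L') c n = n :: pvAllPos L' c (n+1) from by
          simp [pvAllPos, hac]]
        rw [List.dropWhile_cons]
        rw [if_pos (by simp; omega)]
      · rw [show pvAllPos (a::L') c n = pvAllPos L' c (n+1) from by
          simp [pvAllPos, hac]]

lemma greedy_cons (c : Char) (T' : List Char) :
    ∀ (L : List Char) (n : Int),
      pvGreedy L (c :: T') =
        match pvAllPos L c n with
        | [] => 0
        | q :: _ => pvGreedy (L.drop (q - n + 1).toNat) T' + 1 := by
  intro L
  induction L with
  | nil => intro n; simp [pvGreedy, pvAllPos]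
  | cons a L' ih =>
    intro n
    by_cases hac : a = c
    · subst hac
      rw [show pvAllPos (a :: L') a n = n :: pvAllPos L' a (n+1) from by simp [pvAllPos]]
      rw [show pvGreedy (a :: L') (a :: T') = pvGreedy L' T' + 1 from by simp [pvGreedy]]
      show pvGreedy L' T' + 1 = pvGreedy ((a :: L').drop (n - n + 1).toNat) T' + 1
      rw [show (n - n + 1).toNat = 1 from by omega, List.drop_one, List.tail_cons]
    · simp only [pvGreedy, if_neg hac, pvAllPos]
      rw [ih (n+1)]
      cases hpos : pvAllPos L' c (n+1) with
      | nil => rfl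
      | cons q rest =>
        have hq : n+1 ≤ q := mem_allPos_ge c L' (n+1) q (by rw [hpos]; simp)
        simp only []
        rw [show (q - n + 1).toNat = (q - (n+1) + 1).toNat + 1 from by omega,
            List.drop_succ_cons]

lemma build_getD (S : List Char) (c : Char) :
    (pvBuildPos S).getD c [] = pvAllPos S c 0 := by
  have h : pvBuildPos S = ((PySem.List.enumerate S 0).map (fun ic => (ic.2, ic.1))).foldl
      (fun d p => d.modify p.1 [] (fun l => l ++ [p.2])) PySem.Dict.empty := by
    rw [List.foldl_map]
    rfl
  rw [h, PySem.Dict.getD_foldl_modify_append, PySem.Dict.getD_empty, List.nil_append]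
  have key : ∀ (L : List Char) (n : Int),
      ((((PySem.List.enumerate L n).map (fun ic => (ic.2, ic.1))).filter
          (fun p => p.1 == c)).map (fun p => p.2)) = pvAllPos L c n := by
    intro L
    induction L with
    | nil => intro n; simp [PySem.List.enumerate_nil, pvAllPos]
    | cons a L' ih =>
      intro n
      rw [PySem.List.enumerate_cons]
      simp only [List.map_cons, List.filter_cons]
      by_cases hac : a = c
      · simp [pvAllPos, hac, ih (n+1)]
      · simp [show ((a, n).1 == c) = false from by simpa using hac, pvAllPos, hac, ih (n+1)]
  exact key S 0

lemma loopA_eq_greedy (S T : List Char) (hlen : S.length = T.length) :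
    ∀ (n i j cnt : Nat), S.length - i ≤ n →
      pvLoopA S T i j cnt =
        (S.length : Int) - cnt - pvGreedy (S.drop i) (T.drop j) := by
  intro n
  induction n with
  | zero =>
    intro i j cnt h
    rw [pvLoopA, dif_neg (by omega), List.drop_eq_nil_of_le (by omega)]
    simp only [pvGreedy]
    omega
  | succ n ih =>
    intro i j cnt h
    by_cases hi : i < S.length
    · by_cases hj : j < S.length
      · rw [pvLoopA, dif_pos ⟨hi, hj⟩]
        have hjT : j < T.length := by omega
        have hSi : PySem.List.pyGet? S (i : Int) = some S[i] := by
          rw [PySem.List.pyGet?_natCast, List.getElem?_eq_getElem hi]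
        have hTj : PySem.List.pyGet? T (j : Int) = some T[j] := by
          rw [PySem.List.pyGet?_natCast, List.getElem?_eq_getElem hjT]
        by_cases heq : S[i] = T[j]
        · rw [if_pos (by rw [hSi, hTj, heq])]
          rw [ih (i+1) (j+1) (cnt+1) (by omega)]
          rw [List.drop_eq_getElem_cons hi, List.drop_eq_getElem_cons hjT]
          simp only [pvGreedy, if_pos heq]
          omega
        · rw [if_neg (by rw [hSi, hTj]; simpa using heq)]
          rw [ih (i+1) j cnt (by omega)]
          rw [List.drop_eq_getElem_cons hi]
          conv_rhs => rw [List.drop_eq_getElem_cons hjT]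
          conv_lhs => rw [List.drop_eq_getElem_cons hjT]
          simp only [pvGreedy, if_neg heq]
      · rw [pvLoopA, dif_neg (by omega), List.drop_eq_nil_of_le (show T.length ≤ j by omega)]
        rw [pvGreedy_nil]
        omega
    · rw [pvLoopA, dif_neg (by omega), List.drop_eq_nil_of_le (by omega)]
      simp only [pvGreedy]
      omega

lemma loopB_eq_Rm (S : List Char) :
    ∀ (T' : List Char) (pos : PySem.Dict Char (List Int)) (p : Int) (j : Nat),
      (∀ c, (pos.getD c []).dropWhile (fun x => decide (x ≤ p)) =
            (pvAllPos S c 0).dropWhile (fun x => decide (x ≤ p))) →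
      pvLoopB pos p j T' = pvRm S p j T' := by
  intro T'
  induction T' with
  | nil => intro pos p j hinv; rfl
  | cons ch rest ih =>
    intro pos p j hinv
    simp only [pvLoopB, pvRm]
    rw [hinv ch]
    cases hh : (pvAllPos S ch 0).dropWhile (fun x => decide (x ≤ p)) with
    | nil => rfl
    | cons q lrest =>
      simp only []
      have hqp : ¬ (q ≤ p) := by
        simpa using dropWhile_head_false (fun x => decide (x ≤ p)) _ q lrest hh
      apply ih
      intro c
      by_cases hc : c = ch
      · subst hc
        rw [PySem.Dict.getD_insert_self]
        rw [← dropWhile_le_trans (pvAllPos S c 0) p q (by omega), hh,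
            List.dropWhile_cons, if_pos (by simp)]
      · rw [PySem.Dict.getD_insert_of_ne (hne := hc)]
        rw [← dropWhile_le_trans (pos.getD c []) p q (by omega), hinv c,
            dropWhile_le_trans _ p q (by omega)]

lemma Rm_eq_greedy (S : List Char) :
    ∀ (T' : List Char) (p : Int) (j : Nat), -1 ≤ p →
      pvRm S p j T' = j + pvGreedy (S.drop (p+1).toNat) T' := by
  intro T'
  induction T' with
  | nil =>
    intro p j hp
    simp only [pvRm, pvGreedy_nil]
    omega
  | cons c rest ih =>
    intro p j hp
    simp only [pvRm]
    have hcast : (0 : Int) + (((p+1).toNat : Nat) : Int) = p + 1 := by omega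
    have h6 := allPos_drop c ((p+1).toNat) S 0
    rw [hcast] at h6
    rw [show p + 1 - 1 = p from by ring] at h6
    rw [greedy_cons c rest (S.drop (p+1).toNat) (p+1)]
    cases hh : (pvAllPos S c 0).dropWhile (fun x => decide (x ≤ p)) with
    | nil =>
      rw [hh] at h6
      rw [h6]
      show (j : Nat) = j + 0
      omega
    | cons q rest2 =>
      rw [hh] at h6
      rw [h6]
      simp only []
      have hq : p + 1 ≤ q := mem_allPos_ge c (S.drop (p+1).toNat) (p+1) q (by rw [h6]; simp)
      rw [ih q (j+1) (by omega), List.drop_drop]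
      rw [show (p+1).toNat + (q - (p + 1) + 1).toNat = (q+1).toNat from by omega]
      show j + 1 + pvGreedy (List.drop (q + 1).toNat S) rest =
        j + (pvGreedy (List.drop (q + 1).toNat S) rest + 1)
      omega

-- ===== VERDICT (by name: the statement is the Claim_ definition above) =====
theorem convert_s_to_t_spec : Claim_equal_convert_s_to_t := by
  intro S T _
  unfold Spec_convert_s_to_t
  by_cases hST : S = T
  · simp [convert_s_to_t, convert_s_to_t_alt, hST]
  · have hbeq : (S == T) = false := by simpa using hST
    by_cases hperm : S.toList.Perm T.toList
    · have h1 := (dict_test_iff_perm S.toList T.toList).mpr hperm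
      have hsort : (PySem.List.sorted S.toList (fun x => x) false) =
          PySem.List.sorted T.toList (fun x => x) false :=
        (PySem.List.sorted_id_eq_sorted_id_iff_perm _ _).mpr hperm
      simp only [convert_s_to_t, convert_s_to_t_alt, ← PySem.Dict.counter_eq_foldl,
        hbeq, h1, hsort, Bool.not_true, Bool.false_eq_true, if_false, ne_eq,
        not_true_eq_false]
      rw [loopA_eq_greedy S.toList T.toList hperm.length_eq S.toList.length 0 0 0 (by omega)]
      rw [loopB_eq_Rm S.toList T.toList (pvBuildPos S.toList) (-1) 0
            (fun c => by rw [build_getD])]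
      rw [Rm_eq_greedy S.toList T.toList (-1) 0 (by omega)]
      simp
    · have h1 : ((PySem.Dict.counter S.toList).keys.all
          (fun k => (PySem.Dict.counter S.toList).get? k == (PySem.Dict.counter T.toList).get? k) &&
         (PySem.Dict.counter T.toList).keys.all
          (fun k => (PySem.Dict.counter S.toList).get? k == (PySem.Dict.counter T.toList).get? k)) = false := by
        rw [← Bool.not_eq_true]
        intro hx
        exact hperm ((dict_test_iff_perm S.toList T.toList).mp hx)
      have hsort : (PySem.List.sorted S.toList (fun x => x) false) ≠
          PySem.List.sorted T.toList (fun x => x) false := by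
        rw [Ne, PySem.List.sorted_id_eq_sorted_id_iff_perm]
        exact hperm
      simp only [convert_s_to_t, convert_s_to_t_alt, ← PySem.Dict.counter_eq_foldl,
        hbeq, h1, hsort, Bool.not_false, Bool.false_eq_true, if_false, if_true, ne_eq,
        not_false_eq_true]
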